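-- pv_equiv track=rewrite | github.com/danielgaio/local_ai_agent | src/utils/string.py | simple_spell_correct
-- ===== SOURCE A (Python) =====
-- from typing import Dict
--
-- def simple_spell_correct(text: str) -> str:
--     """Very small, deterministic spell-corrections for common domain-specific typos.
--
--     Args:
--         text: The text to correct
--
--     Returns:
--         str: The text with common typos corrected
--     """
--     if not text:
--         return text
--
--     corrections: Dict[str, str] = {
--         "suspention": "suspension",
--         "longtravel": "long-travel",
--         "travle": "travel",
--         "dampning": "damping"
--     }
--
--     out = text
--     for k, v in corrections.items():
--         out = out.replace(k, v)
--         out = out.replace(k.capitalize(), v)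
--     return out
-- ===== SOURCE B (Python) =====
-- def simple_spell_correct(text: str) -> str:
--     """Single left-to-right scan: at each position try the eight literal typos
--     (four lowercase + their capitalized forms) and emit the correction."""
--     pairs = []
--     for k, v in {
--         "suspention": "suspension",
--         "longtravel": "long-travel",
--         "travle": "travel",
--         "dampning": "damping",
--     }.items():
--         pairs.append((k, v))
--         pairs.append((k.capitalize(), v))
--
--     out = []
--     i = 0
--     n = len(text)
--     while i < n:
--         for k, v in pairs:
--             if text.startswith(k, i):
--                 out.append(v)
--                 i += len(k)
--                 break
--         else:
--             out.append(text[i])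
--             i += 1
--     return "".join(out)
-- ===== Notes on version B (the rewrite author's own statement) =====
-- stated objective: alternative
-- what changed: Replaces A's eight sequential whole-string .replace passes (one per typo and per capitalized typo) with a single left-to-right scan that tries the eight literal typos at each position and emits the correction immediately, so the text is traversed once.
-- outside the precondition, e.g. on simple_spell_correct('Longtravelongtravel'): A returns 'long-travelong-travel', B returns 'long-travelongtravel'
import Mathlib
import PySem

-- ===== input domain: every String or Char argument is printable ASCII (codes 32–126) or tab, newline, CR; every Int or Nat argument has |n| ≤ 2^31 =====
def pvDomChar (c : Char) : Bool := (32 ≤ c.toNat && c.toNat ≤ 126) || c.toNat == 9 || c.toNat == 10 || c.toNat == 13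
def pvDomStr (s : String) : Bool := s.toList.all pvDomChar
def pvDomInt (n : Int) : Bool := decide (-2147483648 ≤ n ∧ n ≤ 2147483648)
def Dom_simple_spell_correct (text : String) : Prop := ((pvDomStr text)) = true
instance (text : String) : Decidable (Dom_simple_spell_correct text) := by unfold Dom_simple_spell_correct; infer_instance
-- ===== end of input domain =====

-- B replaces A's eight sequential whole-string .replace passes by a single left-to-right
-- scan matching the eight literal typos position by position; same cost class, alternative structure.

-- ===== PORT A =====
-- Python str.capitalize(); exact on the ASCII domain (first char upper-cased, rest lower-cased)
def pyCapitalize (s : String) : String :=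
  match s.toList with
  | [] => s
  | c :: t => String.ofList (PySem.Chars.upperChar c :: t.map PySem.Chars.lowerChar)

def corrections : List (String × String) :=
  [("suspention", "suspension"), ("longtravel", "long-travel"),
   ("travle", "travel"), ("dampning", "damping")]

def simple_spell_correct (text : String) : String :=
  if text = "" then text
  else corrections.foldl
    (fun out kv => PySem.Str.replace (PySem.Str.replace out kv.1 kv.2) (pyCapitalize kv.1) kv.2)
    text

-- ===== PORT B =====
-- Source B's k.capitalize() on the char-list side
def capB (l : List Char) : List Char :=
  match l with
  | [] => []
  | c :: t => PySem.Chars.upperChar c :: t.map PySem.Chars.lowerChar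

def entriesB : List (String × String) :=
  [("suspention", "suspension"), ("longtravel", "long-travel"),
   ("travle", "travel"), ("dampning", "damping")]

-- Source B builds the pair list: (typo, fix) then (typo.capitalize(), fix) per entry
def pairsB : List (List Char × List Char) :=
  entriesB.foldl
    (fun acc kv => acc ++ [(kv.1.toList, kv.2.toList), (capB kv.1.toList, kv.2.toList)]) []

-- Source B's while-loop over the text: first matching pair is emitted, else the char is copied
def scanB (l : List Char) : List Char :=
  match l with
  | [] => []
  | c :: t =>
    match pairsB.find? (fun p => p.1.isPrefixOf (c :: t)) with
    | some kv => kv.2 ++ scanB (List.drop (kv.1.length - 1) t)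
    | none => c :: scanB t
termination_by l.length
decreasing_by all_goals (simp; try omega)

def simple_spell_correct_alt (text : String) : String :=
  String.ofList (scanB text.toList)

-- ===== PRECONDITION & SPEC =====
-- Pre_ excludes texts containing the self-overlapping pattern "Longtravelongtravel", where the
-- capitalized and the lowercase typo occurrences overlap by one character and which of the
-- overlapping occurrences gets corrected is an unspecifiable tie of A's pass order (A corrects
-- both overlapping occurrences, B the leftmost one; both values are defensible).
def Pre_simple_spell_correct (text : String) : Prop :=
  PySem.Str.isIn "Longtravelongtravel" text = false
instance (text : String) : Decidable (Pre_simple_spell_correct text) := by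
  unfold Pre_simple_spell_correct; infer_instance

def pvWitness_simple_spell_correct : String := "the suspention and Travle dampning"

def Spec_simple_spell_correct (text : String) (out : String) : Prop :=
  out = simple_spell_correct_alt text
instance (text : String) (out : String) : Decidable (Spec_simple_spell_correct text out) := by
  unfold Spec_simple_spell_correct; infer_instance

-- ===== CLAIM (what is proved, stated in full; the proofs are below) =====
def Claim_equal_simple_spell_correct : Prop :=
  ∀ (text : String), Dom_simple_spell_correct text → Pre_simple_spell_correct text →
    Spec_simple_spell_correct text (simple_spell_correct text)

-- ===== LEMMAS AND PROOFS =====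

-- proof-side names for the eight keys, four values, and the special overlap strings
def pvK1 : List Char := "suspention".toList
def pvC1 : List Char := "Suspention".toList
def pvV1 : List Char := "suspension".toList
def pvK2 : List Char := "longtravel".toList
def pvC2 : List Char := "Longtravel".toList
def pvV2 : List Char := "long-travel".toList
def pvK3 : List Char := "travle".toList
def pvC3 : List Char := "Travle".toList
def pvV3 : List Char := "travel".toList
def pvK4 : List Char := "dampning".toList
def pvC4 : List Char := "Dampning".toList
def pvV4 : List Char := "damping".toList
def pvW9 : List Char := "ongtravel".toList
def pvBAD : List Char := "Longtravelongtravel".toList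

-- structural model of one CPython str.replace pass (nonempty pattern)
def repl (k v l : List Char) : List Char :=
  match l with
  | [] => []
  | c :: t =>
    if k <+: (c :: t) ∧ k ≠ [] then v ++ repl k v (List.drop (k.length - 1) t)
    else c :: repl k v t
termination_by l.length
decreasing_by all_goals (simp; try omega)

-- A's eight passes, innermost first
def allR (l : List Char) : List Char :=
  repl pvC4 pvV4 (repl pvK4 pvV4 (repl pvC3 pvV3 (repl pvK3 pvV3
    (repl pvC2 pvV2 (repl pvK2 pvV2 (repl pvC1 pvV1 (repl pvK1 pvV1 l)))))))

theorem repl_nil (k v : List Char) : repl k v [] = [] := by rw [repl]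

theorem repl_neg (k v : List Char) (c : Char) (t : List Char) (h : ¬ k <+: (c :: t)) :
    repl k v (c :: t) = c :: repl k v t := by
  rw [repl, if_neg (by simp [h])]

theorem repl_self (k v r : List Char) (hk : k ≠ []) :
    repl k v (k ++ r) = v ++ repl k v r := by
  cases k with
  | nil => exact absurd rfl hk
  | cons c k' =>
    rw [List.cons_append, repl, if_pos ⟨by simp, by simp⟩]
    simp [List.drop_left']

theorem go_eq (k v : List Char) (hk : k ≠ []) :
    ∀ (f : Nat) (l acc : List Char), l.length ≤ f →
      PySem.Chars.replace.go k v f l acc = acc.reverse ++ repl k v l := by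
  intro f
  induction f with
  | zero =>
    intro l acc hl
    have : l = [] := List.eq_nil_of_length_eq_zero (Nat.le_zero.mp hl)
    subst this
    rw [PySem.Chars.replace.go, repl_nil, List.append_nil]
  | succ f ih =>
    intro l acc hl
    cases l with
    | nil => simp [PySem.Chars.replace.go, repl_nil]
    | cons c t =>
      rw [PySem.Chars.replace.go]
      by_cases h : k <+: (c :: t)
      · rw [if_pos (by exact List.isPrefixOf_iff_prefix.mpr h)]
        cases k with
        | nil => exact absurd rfl hk
        | cons a k' =>
          have hlen : (List.drop (a :: k').length (c :: t)).length ≤ f := by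
            simp at hl ⊢; omega
          rw [ih _ _ hlen, repl, if_pos ⟨h, by simp⟩]
          simp [List.drop_succ_cons]
      · rw [if_neg (by simp [List.isPrefixOf_iff_prefix, h])]
        have hlen : t.length ≤ f := by simp at hl; omega
        rw [ih _ _ hlen, repl_neg _ _ _ _ h]
        simp

theorem replace_eq_repl (s k v : List Char) (hk : k ≠ []) :
    PySem.Chars.replace s k v = repl k v s := by
  rw [PySem.Chars.replace, if_neg (by simpa using hk)]
  simpa using go_eq k v hk s.length s [] le_rfl

-- two incomparable lists: neither is a prefix of the other extended by anything
theorem npx {k d : List Char} (x : List Char) (h1 : ¬ k <+: d) (h2 : ¬ d <+: k) :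
    ¬ k <+: (d ++ x) := fun hc =>
  (List.prefix_or_prefix_of_prefix hc (List.prefix_append d x)).elim h1 h2

-- a replace pass commutes over a block it can never match into
theorem commute_of_no_match (k v w : List Char) (x : List Char)
    (h : ∀ p, p < w.length → ¬ k <+: (List.drop p w ++ x)) :
    repl k v (w ++ x) = w ++ repl k v x := by
  induction w with
  | nil => simp
  | cons c w' ih =>
    have h0 : ¬ k <+: (c :: (w' ++ x)) := by simpa using h 0 (by simp)
    rw [List.cons_append, repl_neg _ _ _ _ h0, ih (fun p hp => by simpa using h (p + 1) (by simpa using hp))]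
    simp

theorem clean_commute (k v w : List Char) (x : List Char) (_hk : k ≠ [])
    (hcl : ∀ p, p < w.length → ¬ k <+: List.drop p w ∧ ¬ List.drop p w <+: k) :
    repl k v (w ++ x) = w ++ repl k v x :=
  commute_of_no_match k v w x
    (fun p hp => npx x (hcl p hp).1 (hcl p hp).2)

-- prefixes of a replace pass output: untouched, or reach into the first replaced value
theorem master (k v : List Char) (hk : k ≠ []) :
    ∀ (n : Nat) (u : List Char), u.length ≤ n → ∀ (w : List Char), w <+: repl k v u →
      w <+: u ∨ ∃ p, p < w.length ∧ u.take p = w.take p ∧ k <+: u.drop p ∧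
        (w.drop p <+: v ∨ v <+: w.drop p) := by
  intro n
  induction n with
  | zero =>
    intro u hu w hw
    have : u = [] := List.eq_nil_of_length_eq_zero (Nat.le_zero.mp hu)
    subst this
    rw [repl_nil] at hw
    exact Or.inl hw
  | succ n ih =>
    intro u hu w hw
    cases u with
    | nil =>
      rw [repl_nil] at hw
      exact Or.inl hw
    | cons c t =>
      by_cases hpre : k <+: (c :: t)
      · rcases (List.prefix_iff_eq_append.mp hpre) with hu'
        cases w with
        | nil => exact Or.inl (List.nil_prefix)
        | cons w0 w' =>
          refine Or.inr ⟨0, by simp, by simp, by simpa using hpre, ?_⟩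
          rw [repl, if_pos ⟨hpre, hk⟩] at hw
          simpa using List.prefix_or_prefix_of_prefix hw (List.prefix_append v _)
      · rw [repl_neg _ _ _ _ hpre] at hw
        cases w with
        | nil => exact Or.inl (List.nil_prefix)
        | cons w0 w' =>
          rw [List.cons_prefix_cons] at hw
          obtain ⟨rfl, hw'⟩ := hw
          rcases ih t (by simpa using Nat.lt_succ_iff.mp (Nat.lt_of_lt_of_le (by simp) hu)) w' hw' with hL | ⟨p, hp, h1, h2, h3⟩
          · exact Or.inl (List.cons_prefix_cons.mpr ⟨rfl, hL⟩)
          · exact Or.inr ⟨p + 1, by simpa using hp, by simpa using h1, by simpa using h2, by simpa using h3⟩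

-- when no suffix of w is comparable with v, a prefix w of the output was already a prefix of the input
theorem pref (k v u w : List Char) (hk : k ≠ [])
    (hcl : ∀ p, p < w.length → ¬ List.drop p w <+: v ∧ ¬ v <+: List.drop p w)
    (h : w <+: repl k v u) : w <+: u := by
  rcases master k v hk u.length u le_rfl w h with hL | ⟨p, hp, _, _, hcmp⟩
  · exact hL
  · exact absurd hcmp (by
      rcases hcl p hp with ⟨a, b⟩
      simp [a, b])

theorem prefix_glue {u a k : List Char} {n : Nat} (h1 : u.take n = a) (h2 : k <+: u.drop n) :
    (a ++ k) <+: u := by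
  rcases h2 with ⟨z, hz⟩
  exact ⟨z, by rw [List.append_assoc, hz, h1.symm, List.take_append_drop]⟩

-- the single dirty commute: the longtravel pass slides over a leading "Longtravel" block
-- unless the text continues with "ongtravel" (excluded via Pre_)
theorem dirty_commute (x : List Char) (hx : ¬ pvW9 <+: x) :
    repl pvK2 pvV2 (pvC2 ++ x) = pvC2 ++ repl pvK2 pvV2 x := by
  apply commute_of_no_match
  intro p hp
  have hp' : p < 10 := by simpa [pvC2] using hp
  interval_cases p
  · exact npx x (by decide) (by decide)
  · exact npx x (by decide) (by decide)
  · exact npx x (by decide) (by decide)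
  · exact npx x (by decide) (by decide)
  · exact npx x (by decide) (by decide)
  · exact npx x (by decide) (by decide)
  · exact npx x (by decide) (by decide)
  · exact npx x (by decide) (by decide)
  · exact npx x (by decide) (by decide)
  · -- p = 9 : drop 9 pvC2 = ['l'], and pvK2 = 'l' :: pvW9
    intro hc
    exact hx (by
      have : pvK2 <+: 'l' :: x := by simpa [pvC2] using hc
      simpa [pvK2, pvW9, List.cons_prefix_cons] using this)

-- the single dirty head step: "Longtravel" cannot become a prefix under the longtravel pass
-- unless it was one, or the input starts with the excluded overlap pattern
theorem notC2_of (u : List Char) (h1 : ¬ pvC2 <+: u) (h2 : ¬ pvBAD <+: u) :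
    ¬ pvC2 <+: repl pvK2 pvV2 u := by
  intro h
  rcases master pvK2 pvV2 (by decide) u.length u le_rfl pvC2 h with hL | ⟨p, hp, ht, hd, hcmp⟩
  · exact h1 hL
  · have hp' : p < 10 := by simpa [pvC2] using hp
    interval_cases p
    · exact absurd hcmp (by decide)
    · exact absurd hcmp (by decide)
    · exact absurd hcmp (by decide)
    · exact absurd hcmp (by decide)
    · exact absurd hcmp (by decide)
    · exact absurd hcmp (by decide)
    · exact absurd hcmp (by decide)
    · exact absurd hcmp (by decide)
    · exact absurd hcmp (by decide)
    · -- p = 9 : u starts "Longtrave" ++ longtravel = pvBAD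
      exact h2 (by
        have := prefix_glue ht hd
        simpa [pvC2, pvK2, pvBAD] using this)

-- pairsB evaluates to the eight literal pairs, in A's pass order
theorem pairsB_eq : pairsB =
    [(pvK1, pvV1), (pvC1, pvV1), (pvK2, pvV2), (pvC2, pvV2),
     (pvK3, pvV3), (pvC3, pvV3), (pvK4, pvV4), (pvC4, pvV4)] := by decide

theorem scanB_nil : scanB [] = [] := by rw [scanB]

theorem scanB_match (k v r : List Char) (hk : k ≠ [])
    (hfind : pairsB.find? (fun p => p.1.isPrefixOf (k ++ r)) = some (k, v)) :
    scanB (k ++ r) = v ++ scanB r := by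
  cases k with
  | nil => exact absurd rfl hk
  | cons a k' =>
    rw [List.cons_append] at hfind ⊢
    rw [scanB, hfind]
    have hd : List.drop ((a :: k').length - 1) (k' ++ r) = r := by
      simp
    simp only [hd]

theorem scanB_nomatch (c : Char) (t : List Char)
    (hfind : pairsB.find? (fun p => p.1.isPrefixOf (c :: t)) = none) :
    scanB (c :: t) = c :: scanB t := by
  rw [scanB, hfind]

-- A-side case lemmas: allR over a leading matched key
theorem allR_K1 (r : List Char) : allR (pvK1 ++ r) = pvV1 ++ allR r := by
  unfold allR
  rw [repl_self _ _ _ (by decide),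
      clean_commute pvC1 pvV1 pvV1 _ (by decide) (by decide),
      clean_commute pvK2 pvV2 pvV1 _ (by decide) (by decide),
      clean_commute pvC2 pvV2 pvV1 _ (by decide) (by decide),
      clean_commute pvK3 pvV3 pvV1 _ (by decide) (by decide),
      clean_commute pvC3 pvV3 pvV1 _ (by decide) (by decide),
      clean_commute pvK4 pvV4 pvV1 _ (by decide) (by decide),
      clean_commute pvC4 pvV4 pvV1 _ (by decide) (by decide)]

theorem allR_C1 (r : List Char) : allR (pvC1 ++ r) = pvV1 ++ allR r := by
  unfold allR
  rw [clean_commute pvK1 pvV1 pvC1 _ (by decide) (by decide),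
      repl_self _ _ _ (by decide),
      clean_commute pvK2 pvV2 pvV1 _ (by decide) (by decide),
      clean_commute pvC2 pvV2 pvV1 _ (by decide) (by decide),
      clean_commute pvK3 pvV3 pvV1 _ (by decide) (by decide),
      clean_commute pvC3 pvV3 pvV1 _ (by decide) (by decide),
      clean_commute pvK4 pvV4 pvV1 _ (by decide) (by decide),
      clean_commute pvC4 pvV4 pvV1 _ (by decide) (by decide)]

theorem allR_K2 (r : List Char) : allR (pvK2 ++ r) = pvV2 ++ allR r := by
  unfold allR
  rw [clean_commute pvK1 pvV1 pvK2 _ (by decide) (by decide),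
      clean_commute pvC1 pvV1 pvK2 _ (by decide) (by decide),
      repl_self _ _ _ (by decide),
      clean_commute pvC2 pvV2 pvV2 _ (by decide) (by decide),
      clean_commute pvK3 pvV3 pvV2 _ (by decide) (by decide),
      clean_commute pvC3 pvV3 pvV2 _ (by decide) (by decide),
      clean_commute pvK4 pvV4 pvV2 _ (by decide) (by decide),
      clean_commute pvC4 pvV4 pvV2 _ (by decide) (by decide)]

theorem allR_C2 (r : List Char) (hr : ¬ pvW9 <+: r) : allR (pvC2 ++ r) = pvV2 ++ allR r := by
  unfold allR
  have hx : ¬ pvW9 <+: repl pvC1 pvV1 (repl pvK1 pvV1 r) := fun h =>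
    hr (pref pvK1 pvV1 r pvW9 (by decide) (by decide)
          (pref pvC1 pvV1 (repl pvK1 pvV1 r) pvW9 (by decide) (by decide) h))
  rw [clean_commute pvK1 pvV1 pvC2 _ (by decide) (by decide),
      clean_commute pvC1 pvV1 pvC2 _ (by decide) (by decide),
      dirty_commute _ hx,
      repl_self _ _ _ (by decide),
      clean_commute pvK3 pvV3 pvV2 _ (by decide) (by decide),
      clean_commute pvC3 pvV3 pvV2 _ (by decide) (by decide),
      clean_commute pvK4 pvV4 pvV2 _ (by decide) (by decide),
      clean_commute pvC4 pvV4 pvV2 _ (by decide) (by decide)]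

theorem allR_K3 (r : List Char) : allR (pvK3 ++ r) = pvV3 ++ allR r := by
  unfold allR
  rw [clean_commute pvK1 pvV1 pvK3 _ (by decide) (by decide),
      clean_commute pvC1 pvV1 pvK3 _ (by decide) (by decide),
      clean_commute pvK2 pvV2 pvK3 _ (by decide) (by decide),
      clean_commute pvC2 pvV2 pvK3 _ (by decide) (by decide),
      repl_self _ _ _ (by decide),
      clean_commute pvC3 pvV3 pvV3 _ (by decide) (by decide),
      clean_commute pvK4 pvV4 pvV3 _ (by decide) (by decide),
      clean_commute pvC4 pvV4 pvV3 _ (by decide) (by decide)]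

theorem allR_C3 (r : List Char) : allR (pvC3 ++ r) = pvV3 ++ allR r := by
  unfold allR
  rw [clean_commute pvK1 pvV1 pvC3 _ (by decide) (by decide),
      clean_commute pvC1 pvV1 pvC3 _ (by decide) (by decide),
      clean_commute pvK2 pvV2 pvC3 _ (by decide) (by decide),
      clean_commute pvC2 pvV2 pvC3 _ (by decide) (by decide),
      clean_commute pvK3 pvV3 pvC3 _ (by decide) (by decide),
      repl_self _ _ _ (by decide),
      clean_commute pvK4 pvV4 pvV3 _ (by decide) (by decide),
      clean_commute pvC4 pvV4 pvV3 _ (by decide) (by decide)]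

theorem allR_K4 (r : List Char) : allR (pvK4 ++ r) = pvV4 ++ allR r := by
  unfold allR
  rw [clean_commute pvK1 pvV1 pvK4 _ (by decide) (by decide),
      clean_commute pvC1 pvV1 pvK4 _ (by decide) (by decide),
      clean_commute pvK2 pvV2 pvK4 _ (by decide) (by decide),
      clean_commute pvC2 pvV2 pvK4 _ (by decide) (by decide),
      clean_commute pvK3 pvV3 pvK4 _ (by decide) (by decide),
      clean_commute pvC3 pvV3 pvK4 _ (by decide) (by decide),
      repl_self _ _ _ (by decide),
      clean_commute pvC4 pvV4 pvV4 _ (by decide) (by decide)]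

theorem allR_C4 (r : List Char) : allR (pvC4 ++ r) = pvV4 ++ allR r := by
  unfold allR
  rw [clean_commute pvK1 pvV1 pvC4 _ (by decide) (by decide),
      clean_commute pvC1 pvV1 pvC4 _ (by decide) (by decide),
      clean_commute pvK2 pvV2 pvC4 _ (by decide) (by decide),
      clean_commute pvC2 pvV2 pvC4 _ (by decide) (by decide),
      clean_commute pvK3 pvV3 pvC4 _ (by decide) (by decide),
      clean_commute pvC3 pvV3 pvC4 _ (by decide) (by decide),
      clean_commute pvK4 pvV4 pvC4 _ (by decide) (by decide),
      repl_self _ _ _ (by decide)]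

-- the no-match head step for allR
theorem allR_cons (c : Char) (t : List Char)
    (h1 : ¬ pvK1 <+: (c :: t)) (h2 : ¬ pvC1 <+: (c :: t))
    (h3 : ¬ pvK2 <+: (c :: t)) (h4 : ¬ pvC2 <+: (c :: t))
    (h5 : ¬ pvK3 <+: (c :: t)) (h6 : ¬ pvC3 <+: (c :: t))
    (h7 : ¬ pvK4 <+: (c :: t)) (h8 : ¬ pvC4 <+: (c :: t))
    (hbad : ¬ pvBAD <+: (c :: t)) :
    allR (c :: t) = c :: allR t := by
  unfold allR
  have e1 := repl_neg pvK1 pvV1 c t h1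
  have n2 : ¬ pvC1 <+: repl pvK1 pvV1 (c :: t) := fun h =>
    h2 (pref pvK1 pvV1 _ pvC1 (by decide) (by decide) h)
  rw [e1] at n2
  have e2 := repl_neg pvC1 pvV1 c (repl pvK1 pvV1 t) n2
  have n3 : ¬ pvK2 <+: repl pvC1 pvV1 (repl pvK1 pvV1 (c :: t)) := fun h =>
    h3 (pref pvK1 pvV1 _ pvK2 (by decide) (by decide)
        (pref pvC1 pvV1 _ pvK2 (by decide) (by decide) h))
  rw [e1, e2] at n3
  have e3 := repl_neg pvK2 pvV2 c (repl pvC1 pvV1 (repl pvK1 pvV1 t)) n3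
  -- the dirty stage: Longtravel over the longtravel pass
  have nC2u : ¬ pvC2 <+: repl pvC1 pvV1 (repl pvK1 pvV1 (c :: t)) := fun h =>
    h4 (pref pvK1 pvV1 _ pvC2 (by decide) (by decide)
        (pref pvC1 pvV1 _ pvC2 (by decide) (by decide) h))
  have nBADu : ¬ pvBAD <+: repl pvC1 pvV1 (repl pvK1 pvV1 (c :: t)) := fun h =>
    hbad (pref pvK1 pvV1 _ pvBAD (by decide) (by decide)
        (pref pvC1 pvV1 _ pvBAD (by decide) (by decide) h))
  have n4 : ¬ pvC2 <+: repl pvK2 pvV2 (repl pvC1 pvV1 (repl pvK1 pvV1 (c :: t))) :=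
    notC2_of _ nC2u nBADu
  rw [e1, e2, e3] at n4
  have e4 := repl_neg pvC2 pvV2 c (repl pvK2 pvV2 (repl pvC1 pvV1 (repl pvK1 pvV1 t))) n4
  have n5 : ¬ pvK3 <+: repl pvC2 pvV2 (repl pvK2 pvV2 (repl pvC1 pvV1 (repl pvK1 pvV1 (c :: t)))) := fun h =>
    h5 (pref pvK1 pvV1 _ pvK3 (by decide) (by decide)
        (pref pvC1 pvV1 _ pvK3 (by decide) (by decide)
        (pref pvK2 pvV2 _ pvK3 (by decide) (by decide)
        (pref pvC2 pvV2 _ pvK3 (by decide) (by decide) h))))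
  rw [e1, e2, e3, e4] at n5
  have e5 := repl_neg pvK3 pvV3 c _ n5
  have n6 : ¬ pvC3 <+: repl pvK3 pvV3 (repl pvC2 pvV2 (repl pvK2 pvV2 (repl pvC1 pvV1 (repl pvK1 pvV1 (c :: t))))) := fun h =>
    h6 (pref pvK1 pvV1 _ pvC3 (by decide) (by decide)
        (pref pvC1 pvV1 _ pvC3 (by decide) (by decide)
        (pref pvK2 pvV2 _ pvC3 (by decide) (by decide)
        (pref pvC2 pvV2 _ pvC3 (by decide) (by decide)
        (pref pvK3 pvV3 _ pvC3 (by decide) (by decide) h)))))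
  rw [e1, e2, e3, e4, e5] at n6
  have e6 := repl_neg pvC3 pvV3 c _ n6
  have n7 : ¬ pvK4 <+: repl pvC3 pvV3 (repl pvK3 pvV3 (repl pvC2 pvV2 (repl pvK2 pvV2 (repl pvC1 pvV1 (repl pvK1 pvV1 (c :: t)))))) := fun h =>
    h7 (pref pvK1 pvV1 _ pvK4 (by decide) (by decide)
        (pref pvC1 pvV1 _ pvK4 (by decide) (by decide)
        (pref pvK2 pvV2 _ pvK4 (by decide) (by decide)
        (pref pvC2 pvV2 _ pvK4 (by decide) (by decide)
        (pref pvK3 pvV3 _ pvK4 (by decide) (by decide)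
        (pref pvC3 pvV3 _ pvK4 (by decide) (by decide) h))))))
  rw [e1, e2, e3, e4, e5, e6] at n7
  have e7 := repl_neg pvK4 pvV4 c _ n7
  have n8 : ¬ pvC4 <+: repl pvK4 pvV4 (repl pvC3 pvV3 (repl pvK3 pvV3 (repl pvC2 pvV2 (repl pvK2 pvV2 (repl pvC1 pvV1 (repl pvK1 pvV1 (c :: t))))))) := fun h =>
    h8 (pref pvK1 pvV1 _ pvC4 (by decide) (by decide)
        (pref pvC1 pvV1 _ pvC4 (by decide) (by decide)
        (pref pvK2 pvV2 _ pvC4 (by decide) (by decide)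
        (pref pvC2 pvV2 _ pvC4 (by decide) (by decide)
        (pref pvK3 pvV3 _ pvC4 (by decide) (by decide)
        (pref pvC3 pvV3 _ pvC4 (by decide) (by decide)
        (pref pvK4 pvV4 _ pvC4 (by decide) (by decide) h)))))))
  rw [e1, e2, e3, e4, e5, e6, e7] at n8
  have e8 := repl_neg pvC4 pvV4 c _ n8
  rw [e1, e2, e3, e4, e5, e6, e7, e8]

-- infix of a suffix is an infix
theorem nbad_tail {s r : List Char} (hnb : ¬ pvBAD <:+: s) (hsuf : r <:+ s) :
    ¬ pvBAD <:+: r := fun h => hnb (h.trans hsuf.isInfix)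

-- the core equivalence, by strong induction on the text
theorem core : ∀ (n : Nat) (s : List Char), s.length ≤ n → ¬ pvBAD <:+: s →
    allR s = scanB s := by
  intro n
  induction n with
  | zero =>
    intro s hl _
    have : s = [] := List.eq_nil_of_length_eq_zero (Nat.le_zero.mp hl)
    subst this
    simp [allR, repl_nil, scanB_nil]
  | succ n ih =>
    intro s hl hnb
    cases s with
    | nil => simp [allR, repl_nil, scanB_nil]
    | cons c t =>
      have hbadpre : ¬ pvBAD <+: (c :: t) := fun h => hnb h.isInfix
      by_cases g1 : pvK1 <+: (c :: t)
      · obtain ⟨r, hr⟩ := g1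
        rw [← hr] at hl hnb hbadpre ⊢
        rw [allR_K1, scanB_match pvK1 pvV1 r (by decide) (by
            rw [pairsB_eq,
              List.find?_cons_of_pos (by simp [List.isPrefixOf_iff_prefix, List.prefix_append])])]
        congr 1
        exact ih r (by simp [pvK1] at hl; omega) (nbad_tail hnb ⟨pvK1, rfl⟩)
      · by_cases g2 : pvC1 <+: (c :: t)
        · obtain ⟨r, hr⟩ := g2
          rw [← hr] at hl hnb hbadpre g1 ⊢
          rw [allR_C1, scanB_match pvC1 pvV1 r (by decide) (by
              rw [pairsB_eq,
                List.find?_cons_of_neg (by simpa [List.isPrefixOf_iff_prefix] using g1),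
                List.find?_cons_of_pos (by simp [List.isPrefixOf_iff_prefix, List.prefix_append])])]
          congr 1
          exact ih r (by simp [pvC1] at hl; omega) (nbad_tail hnb ⟨pvC1, rfl⟩)
        · by_cases g3 : pvK2 <+: (c :: t)
          · obtain ⟨r, hr⟩ := g3
            rw [← hr] at hl hnb hbadpre g1 g2 ⊢
            rw [allR_K2, scanB_match pvK2 pvV2 r (by decide) (by
                rw [pairsB_eq,
                  List.find?_cons_of_neg (by simpa [List.isPrefixOf_iff_prefix] using g1),
                  List.find?_cons_of_neg (by simpa [List.isPrefixOf_iff_prefix] using g2),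
                  List.find?_cons_of_pos (by simp [List.isPrefixOf_iff_prefix, List.prefix_append])])]
            congr 1
            exact ih r (by simp [pvK2] at hl; omega) (nbad_tail hnb ⟨pvK2, rfl⟩)
          · by_cases g4 : pvC2 <+: (c :: t)
            · obtain ⟨r, hr⟩ := g4
              rw [← hr] at hl hnb hbadpre g1 g2 g3 ⊢
              have hw9 : ¬ pvW9 <+: r := fun h => hbadpre (by
                rcases h with ⟨z, hz⟩
                exact ⟨z, by rw [← hz, show pvBAD = pvC2 ++ pvW9 by decide, List.append_assoc]⟩)
              rw [allR_C2 r hw9, scanB_match pvC2 pvV2 r (by decide) (by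
                  rw [pairsB_eq,
                    List.find?_cons_of_neg (by simpa [List.isPrefixOf_iff_prefix] using g1),
                    List.find?_cons_of_neg (by simpa [List.isPrefixOf_iff_prefix] using g2),
                    List.find?_cons_of_neg (by simpa [List.isPrefixOf_iff_prefix] using g3),
                    List.find?_cons_of_pos (by simp [List.isPrefixOf_iff_prefix, List.prefix_append])])]
              congr 1
              exact ih r (by simp [pvC2] at hl; omega) (nbad_tail hnb ⟨pvC2, rfl⟩)
            · by_cases g5 : pvK3 <+: (c :: t)
              · obtain ⟨r, hr⟩ := g5
                rw [← hr] at hl hnb hbadpre g1 g2 g3 g4 ⊢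
                rw [allR_K3, scanB_match pvK3 pvV3 r (by decide) (by
                    rw [pairsB_eq,
                      List.find?_cons_of_neg (by simpa [List.isPrefixOf_iff_prefix] using g1),
                      List.find?_cons_of_neg (by simpa [List.isPrefixOf_iff_prefix] using g2),
                      List.find?_cons_of_neg (by simpa [List.isPrefixOf_iff_prefix] using g3),
                      List.find?_cons_of_neg (by simpa [List.isPrefixOf_iff_prefix] using g4),
                      List.find?_cons_of_pos (by simp [List.isPrefixOf_iff_prefix, List.prefix_append])])]
                congr 1
                exact ih r (by simp [pvK3] at hl; omega) (nbad_tail hnb ⟨pvK3, rfl⟩)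
              · by_cases g6 : pvC3 <+: (c :: t)
                · obtain ⟨r, hr⟩ := g6
                  rw [← hr] at hl hnb hbadpre g1 g2 g3 g4 g5 ⊢
                  rw [allR_C3, scanB_match pvC3 pvV3 r (by decide) (by
                      rw [pairsB_eq,
                        List.find?_cons_of_neg (by simpa [List.isPrefixOf_iff_prefix] using g1),
                        List.find?_cons_of_neg (by simpa [List.isPrefixOf_iff_prefix] using g2),
                        List.find?_cons_of_neg (by simpa [List.isPrefixOf_iff_prefix] using g3),
                        List.find?_cons_of_neg (by simpa [List.isPrefixOf_iff_prefix] using g4),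
                        List.find?_cons_of_neg (by simpa [List.isPrefixOf_iff_prefix] using g5),
                        List.find?_cons_of_pos (by simp [List.isPrefixOf_iff_prefix, List.prefix_append])])]
                  congr 1
                  exact ih r (by simp [pvC3] at hl; omega) (nbad_tail hnb ⟨pvC3, rfl⟩)
                · by_cases g7 : pvK4 <+: (c :: t)
                  · obtain ⟨r, hr⟩ := g7
                    rw [← hr] at hl hnb hbadpre g1 g2 g3 g4 g5 g6 ⊢
                    rw [allR_K4, scanB_match pvK4 pvV4 r (by decide) (by
                        rw [pairsB_eq,
                          List.find?_cons_of_neg (by simpa [List.isPrefixOf_iff_prefix] using g1),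
                          List.find?_cons_of_neg (by simpa [List.isPrefixOf_iff_prefix] using g2),
                          List.find?_cons_of_neg (by simpa [List.isPrefixOf_iff_prefix] using g3),
                          List.find?_cons_of_neg (by simpa [List.isPrefixOf_iff_prefix] using g4),
                          List.find?_cons_of_neg (by simpa [List.isPrefixOf_iff_prefix] using g5),
                          List.find?_cons_of_neg (by simpa [List.isPrefixOf_iff_prefix] using g6),
                          List.find?_cons_of_pos (by simp [List.isPrefixOf_iff_prefix, List.prefix_append])])]
                    congr 1
                    exact ih r (by simp [pvK4] at hl; omega) (nbad_tail hnb ⟨pvK4, rfl⟩)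
                  · by_cases g8 : pvC4 <+: (c :: t)
                    · obtain ⟨r, hr⟩ := g8
                      rw [← hr] at hl hnb hbadpre g1 g2 g3 g4 g5 g6 g7 ⊢
                      rw [allR_C4, scanB_match pvC4 pvV4 r (by decide) (by
                          rw [pairsB_eq,
                            List.find?_cons_of_neg (by simpa [List.isPrefixOf_iff_prefix] using g1),
                            List.find?_cons_of_neg (by simpa [List.isPrefixOf_iff_prefix] using g2),
                            List.find?_cons_of_neg (by simpa [List.isPrefixOf_iff_prefix] using g3),
                            List.find?_cons_of_neg (by simpa [List.isPrefixOf_iff_prefix] using g4),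
                            List.find?_cons_of_neg (by simpa [List.isPrefixOf_iff_prefix] using g5),
                            List.find?_cons_of_neg (by simpa [List.isPrefixOf_iff_prefix] using g6),
                            List.find?_cons_of_neg (by simpa [List.isPrefixOf_iff_prefix] using g7),
                            List.find?_cons_of_pos (by simp [List.isPrefixOf_iff_prefix, List.prefix_append])])]
                      congr 1
                      exact ih r (by simp [pvC4] at hl; omega) (nbad_tail hnb ⟨pvC4, rfl⟩)
                    · rw [allR_cons c t g1 g2 g3 g4 g5 g6 g7 g8 hbadpre,
                      scanB_nomatch c t (by
                      rw [pairsB_eq,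
                      List.find?_cons_of_neg (by simpa [List.isPrefixOf_iff_prefix] using g1),
                      List.find?_cons_of_neg (by simpa [List.isPrefixOf_iff_prefix] using g2),
                      List.find?_cons_of_neg (by simpa [List.isPrefixOf_iff_prefix] using g3),
                      List.find?_cons_of_neg (by simpa [List.isPrefixOf_iff_prefix] using g4),
                      List.find?_cons_of_neg (by simpa [List.isPrefixOf_iff_prefix] using g5),
                      List.find?_cons_of_neg (by simpa [List.isPrefixOf_iff_prefix] using g6),
                      List.find?_cons_of_neg (by simpa [List.isPrefixOf_iff_prefix] using g7),
                      List.find?_cons_of_neg (by simpa [List.isPrefixOf_iff_prefix] using g8),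
                  List.find?_nil])]
                      congr 1
                      exact ih t (by simp at hl; omega) (nbad_tail hnb (List.suffix_cons c t))

-- A's port unfolds to the eight-pass chain on the char list
theorem portA_toList (text : String) (h : ¬ text = "") :
    (simple_spell_correct text).toList = allR text.toList := by
  have c1 : pyCapitalize "suspention" = "Suspention" := by decide
  have c2 : pyCapitalize "longtravel" = "Longtravel" := by decide
  have c3 : pyCapitalize "travle" = "Travle" := by decide
  have c4 : pyCapitalize "dampning" = "Dampning" := by decide
  rw [simple_spell_correct, if_neg h]
  simp only [corrections, List.foldl, c1, c2, c3, c4]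
  simp only [PySem.Str.toList_replace]
  rw [allR]
  rw [replace_eq_repl _ _ _ (by decide), replace_eq_repl _ _ _ (by decide),
      replace_eq_repl _ _ _ (by decide), replace_eq_repl _ _ _ (by decide),
      replace_eq_repl _ _ _ (by decide), replace_eq_repl _ _ _ (by decide),
      replace_eq_repl _ _ _ (by decide), replace_eq_repl _ _ _ (by decide)]
  rfl

-- ===== VERDICT (by name: the statement is the Claim_ definition above) =====
theorem simple_spell_correct_spec : Claim_equal_simple_spell_correct := by
  intro text _ hpre
  unfold Spec_simple_spell_correct simple_spell_correct_alt
  by_cases h : text = ""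
  · subst h
    simp [simple_spell_correct, scanB_nil]
  · apply String.toList_inj.mp
    rw [portA_toList text h]
    have hnb : ¬ pvBAD <:+: text.toList := by
      intro hin
      have h2 : PySem.Str.isIn "Longtravelongtravel" text = true := by
        rw [PySem.Str.isIn_iff_infix]; exact hin
      rw [Pre_simple_spell_correct, h2] at hpre
      exact absurd hpre (by decide)
    rw [core text.toList.length text.toList le_rfl hnb]
    simp
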